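-- pv_equiv track=rewrite | github.com/chen3463/DCNv2 | hypertun_run_cpu.py | build_feature_slices
-- ===== SOURCE A (Python) =====
-- def build_feature_slices(num_numerical, emb_cat_cardinalities, onehot_cardinalities):
--     emb_feature_slices = []
--     start = num_numerical
--     for cardinality in emb_cat_cardinalities:
--         emb_feature_slices.append((start, start + cardinality))
--         start += cardinality
--
--     onehot_feature_slices = []
--     for cardinality in onehot_cardinalities:
--         onehot_feature_slices.append((start, start + cardinality))
--         start += cardinality
--
--     return emb_feature_slices, onehot_feature_slices
-- ===== SOURCE B (Python) =====
-- def build_feature_slices(num_numerical, emb_cat_cardinalities, onehot_cardinalities):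
--     # boundaries table first: offsets[i] = num_numerical + sum of the first i cardinalities
--     offsets = [num_numerical]
--     cur = num_numerical
--     for c in emb_cat_cardinalities + onehot_cardinalities:
--         cur += c
--         offsets.append(cur)
--     slices = list(zip(offsets, offsets[1:]))
--     k = len(emb_cat_cardinalities)
--     return slices[:k], slices[k:]
-- ===== Notes on version B (the rewrite author's own statement) =====
-- stated objective: alternative
-- what changed: B first computes the full prefix-sum boundary table over the concatenated cardinality lists, then derives every slice by zipping consecutive boundaries and partitions the one slice list at len(emb_cat_cardinalities), instead of A's two inline accumulating loops.
import Mathlib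
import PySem

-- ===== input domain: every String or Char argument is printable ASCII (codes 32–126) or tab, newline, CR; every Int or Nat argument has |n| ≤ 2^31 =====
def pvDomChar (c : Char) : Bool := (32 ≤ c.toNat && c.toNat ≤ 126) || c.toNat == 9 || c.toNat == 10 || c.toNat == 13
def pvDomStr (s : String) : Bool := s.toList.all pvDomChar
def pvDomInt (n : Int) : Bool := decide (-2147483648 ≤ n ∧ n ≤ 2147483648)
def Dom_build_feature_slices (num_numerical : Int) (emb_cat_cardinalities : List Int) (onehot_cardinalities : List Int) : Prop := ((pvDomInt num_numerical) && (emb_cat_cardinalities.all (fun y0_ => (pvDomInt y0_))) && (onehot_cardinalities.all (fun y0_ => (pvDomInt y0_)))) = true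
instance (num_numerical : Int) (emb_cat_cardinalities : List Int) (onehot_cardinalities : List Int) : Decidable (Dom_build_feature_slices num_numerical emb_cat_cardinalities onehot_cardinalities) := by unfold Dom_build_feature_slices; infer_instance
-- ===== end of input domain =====

-- B derives all slices from one prefix-sum boundary table over the concatenated lists and partitions it; alternative decomposition, same cost.


-- ===== PORT A =====
-- two inline accumulating loops, each appending (start, start + c) and advancing start
def build_feature_slices (num_numerical : Int) (emb_cat_cardinalities : List Int) (onehot_cardinalities : List Int) : (List (Int × Int)) × (List (Int × Int)) :=
  let p1 := emb_cat_cardinalities.foldl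
    (fun (acc : List (Int × Int) × Int) c => (acc.1 ++ [(acc.2, acc.2 + c)], acc.2 + c))
    ([], num_numerical)
  let p2 := onehot_cardinalities.foldl
    (fun (acc : List (Int × Int) × Int) c => (acc.1 ++ [(acc.2, acc.2 + c)], acc.2 + c))
    ([], p1.2)
  (p1.1, p2.1)

-- ===== PORT B =====
-- boundary table over the concatenation, zip consecutive boundaries, partition at length of the first list
def build_feature_slices_alt (num_numerical : Int) (emb_cat_cardinalities : List Int) (onehot_cardinalities : List Int) : (List (Int × Int)) × (List (Int × Int)) :=
  let p := (emb_cat_cardinalities ++ onehot_cardinalities).foldl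
    (fun (acc : List Int × Int) c => (acc.1 ++ [acc.2 + c], acc.2 + c))
    ([num_numerical], num_numerical)
  let offsets := p.1
  let slices := offsets.zip offsets.tail
  let k := emb_cat_cardinalities.length
  (slices.take k, slices.drop k)

-- ===== PRECONDITION & SPEC =====
def Spec_build_feature_slices (num_numerical : Int) (emb_cat_cardinalities : List Int) (onehot_cardinalities : List Int) (out : (List (Int × Int)) × (List (Int × Int))) : Prop := out = build_feature_slices_alt num_numerical emb_cat_cardinalities onehot_cardinalities
instance (num_numerical : Int) (emb_cat_cardinalities : List Int) (onehot_cardinalities : List Int) (out : (List (Int × Int)) × (List (Int × Int))) : Decidable (Spec_build_feature_slices num_numerical emb_cat_cardinalities onehot_cardinalities out) := by unfold Spec_build_feature_slices; infer_instance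

-- ===== CLAIM (what is proved, stated in full; the proofs are below) =====
def Claim_equal_build_feature_slices : Prop := ∀ (num_numerical : Int) (emb_cat_cardinalities : List Int) (onehot_cardinalities : List Int), Dom_build_feature_slices num_numerical emb_cat_cardinalities onehot_cardinalities → Spec_build_feature_slices num_numerical emb_cat_cardinalities onehot_cardinalities (build_feature_slices num_numerical emb_cat_cardinalities onehot_cardinalities)

-- ===== LEMMAS AND PROOFS =====

/-- Reference slice sequence: slices of `l` starting at `s`. -/
def pvSl (s : Int) : List Int → List (Int × Int)
  | [] => []
  | c :: cs => (s, s + c) :: pvSl (s + c) cs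

theorem pvSl_length (s : Int) (l : List Int) : (pvSl s l).length = l.length := by
  induction l generalizing s with
  | nil => rfl
  | cons c cs ih => simp [pvSl, ih]

theorem pvSl_append (s : Int) (l1 l2 : List Int) :
    pvSl s (l1 ++ l2) = pvSl s l1 ++ pvSl (s + l1.sum) l2 := by
  induction l1 generalizing s with
  | nil => simp [pvSl]
  | cons c cs ih => simp [pvSl, ih, add_assoc]

theorem pvA_fold (l : List Int) (acc : List (Int × Int)) (s : Int) :
    l.foldl (fun (acc : List (Int × Int) × Int) c => (acc.1 ++ [(acc.2, acc.2 + c)], acc.2 + c)) (acc, s)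
      = (acc ++ pvSl s l, s + l.sum) := by
  induction l generalizing acc s with
  | nil => simp [pvSl]
  | cons c cs ih => simp [List.foldl, ih, pvSl, add_assoc]

theorem pvB_fold (l : List Int) (offs : List Int) (s : Int) :
    l.foldl (fun (acc : List Int × Int) c => (acc.1 ++ [acc.2 + c], acc.2 + c)) (offs, s)
      = (offs ++ (pvSl s l).map Prod.snd, s + l.sum) := by
  induction l generalizing offs s with
  | nil => simp [pvSl]
  | cons c cs ih => simp [List.foldl, ih, pvSl, add_assoc]

theorem pvZip_sl (s : Int) (l : List Int) :
    List.zip (s :: (pvSl s l).map Prod.snd) ((pvSl s l).map Prod.snd) = pvSl s l := by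
  induction l generalizing s with
  | nil => rfl
  | cons c cs ih => simp only [pvSl, List.map_cons, List.zip_cons_cons]; rw [ih]

-- ===== VERDICT (by name: the statement is the Claim_ definition above) =====
theorem build_feature_slices_spec : Claim_equal_build_feature_slices := by
  intro n emb oh _
  unfold Spec_build_feature_slices build_feature_slices build_feature_slices_alt
  simp only [pvA_fold, pvB_fold, List.nil_append]
  simp only [List.singleton_append, List.tail_cons]
  rw [pvZip_sl, pvSl_append]
  refine Prod.ext ?_ ?_
  · show pvSl n emb = List.take emb.length (pvSl n emb ++ pvSl (n + emb.sum) oh)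
    rw [List.take_append_of_le_length (by simp [pvSl_length]),
        List.take_of_length_le (by simp [pvSl_length])]
  · show pvSl (n + emb.sum) oh = List.drop emb.length (pvSl n emb ++ pvSl (n + emb.sum) oh)
    rw [List.drop_append_of_le_length (by simp [pvSl_length]),
        List.drop_of_length_le (by simp [pvSl_length])]
    simp
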